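-- pv_equiv track=rewrite | github.com/divyaprakash56/45_days_of_code | Day-26_BUY1GET1.py | min_cost_to_buy_jewels
-- ===== SOURCE A (Python) =====
-- def min_cost_to_buy_jewels(test_cases):
--     results = []
--     for jewels in test_cases:
--         jewel_count = {}
--
--         # Count occurrences of each jewel
--         for jewel in jewels:
--             if jewel in jewel_count:
--                 jewel_count[jewel] += 1
--             else:
--                 jewel_count[jewel] = 1
--
--         # Calculate cost
--         cost = 0
--         for count in jewel_count.values():
--             cost += (count + 1) // 2  # Buy half + 1 if odd
--
--         results.append(cost)
--     return results
-- ===== SOURCE B (Python) =====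
-- def min_cost_to_buy_jewels(test_cases):
--     results = []
--     for jewels in test_cases:
--         unpaired = set()
--         cost = 0
--         for jewel in jewels:
--             if jewel in unpaired:
--                 unpaired.discard(jewel)   # second of a pair is free
--             else:
--                 unpaired.add(jewel)       # first of a pair is paid
--                 cost += 1
--         results.append(cost)
--     return results
-- ===== Notes on version B (the rewrite author's own statement) =====
-- stated objective: simpler
-- what changed: Replaces the count-dictionary plus a second reduction loop over counts by a single greedy pass per test case that toggles each jewel in an 'unpaired' set and pays only when a pair is opened.
import Mathlib
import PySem

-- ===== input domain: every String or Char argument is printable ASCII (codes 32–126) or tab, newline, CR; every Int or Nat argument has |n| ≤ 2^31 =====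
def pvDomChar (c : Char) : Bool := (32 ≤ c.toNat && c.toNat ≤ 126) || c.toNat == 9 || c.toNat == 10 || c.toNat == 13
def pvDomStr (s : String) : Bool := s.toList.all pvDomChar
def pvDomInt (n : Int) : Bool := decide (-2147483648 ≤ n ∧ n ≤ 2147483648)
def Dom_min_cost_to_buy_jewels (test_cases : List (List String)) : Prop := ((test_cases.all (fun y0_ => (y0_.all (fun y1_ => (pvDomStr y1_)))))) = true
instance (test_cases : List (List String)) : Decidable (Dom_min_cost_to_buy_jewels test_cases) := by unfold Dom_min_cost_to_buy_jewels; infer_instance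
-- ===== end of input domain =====

-- B replaces A's count-dictionary + second loop over counts by a single greedy
-- toggle pass per test case (one pass, no dictionary); same return value.

-- ===== PORT A =====
def min_cost_to_buy_jewels (test_cases : List (List String)) : List Int :=
  test_cases.foldl (fun results jewels =>
    let jewel_count : PySem.Dict String Int :=
      jewels.foldl (fun d jewel =>
          if d.contains jewel then d.modify jewel 0 (· + 1) else d.insert jewel 1)
        PySem.Dict.empty
    let cost : Int :=
      jewel_count.values.foldl (fun cost count => cost + PySem.Int.floordiv (count + 1) 2) 0
    results ++ [cost]) []

-- ===== PORT B =====
-- one greedy pass over one test case: state = (unpaired set, cost so far)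
def pvAltCase (jewels : List String) : PySem.Set String × Int :=
  jewels.foldl (fun st jewel =>
      if PySem.Set.contains st.1 jewel then (PySem.Set.discard st.1 jewel, st.2)
      else (PySem.Set.add st.1 jewel, st.2 + 1))
    (PySem.Set.empty, 0)

def min_cost_to_buy_jewels_alt (test_cases : List (List String)) : List Int :=
  test_cases.map (fun jewels => (pvAltCase jewels).2)

-- ===== PRECONDITION & SPEC =====
def Spec_min_cost_to_buy_jewels (test_cases : List (List String)) (out : List Int) : Prop := out = min_cost_to_buy_jewels_alt test_cases
instance (test_cases : List (List String)) (out : List Int) : Decidable (Spec_min_cost_to_buy_jewels test_cases out) := by unfold Spec_min_cost_to_buy_jewels; infer_instance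

-- ===== CLAIM (what is proved, stated in full; the proofs are below) =====
def Claim_equal_min_cost_to_buy_jewels : Prop := ∀ (test_cases : List (List String)), Dom_min_cost_to_buy_jewels test_cases → Spec_min_cost_to_buy_jewels test_cases (min_cost_to_buy_jewels test_cases)

-- ===== LEMMAS AND PROOFS =====

-- the common per-test-case value: sum of ceil(count/2) over the distinct jewels
def specCost (xs : List String) : Int :=
  ((PySem.Set.ofList xs).map
    (fun k => PySem.Int.floordiv ((List.count k xs : Int) + 1) 2)).sum

-- A's dict-building branch is pointwise the Counter step
lemma afun_eq_counter_step (d : PySem.Dict String Int) (x : String) :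
    (if d.contains x then d.modify x 0 (· + 1) else d.insert x 1)
      = d.modify x 0 (· + 1) := by
  by_cases h : d.contains x = true
  · simp [h]
  · simp only [Bool.not_eq_true] at h
    simp [h, PySem.Dict.modify,
      PySem.Dict.getD_of_not_contains d (0 : Int) h]

lemma costA_eq_specCost (jewels : List String) :
    (PySem.Dict.values
        (jewels.foldl (fun d jewel =>
            if d.contains jewel then d.modify jewel 0 (· + 1) else d.insert jewel 1)
          PySem.Dict.empty)).foldl
      (fun cost count => cost + PySem.Int.floordiv (count + 1) 2) 0
    = specCost jewels := by
  have hd : jewels.foldl (fun d jewel =>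
        if d.contains jewel then d.modify jewel 0 (· + 1) else d.insert jewel 1)
        PySem.Dict.empty = PySem.Dict.counter jewels := by
    rw [show (fun (d : PySem.Dict String Int) jewel =>
          if d.contains jewel then d.modify jewel 0 (· + 1) else d.insert jewel 1)
        = (fun d jewel => d.modify jewel 0 (· + 1)) from
      funext fun d => funext fun x => afun_eq_counter_step d x]
    rfl
  rw [hd, PySem.List.foldl_add, PySem.Dict.values, PySem.Dict.items_counter]
  simp only [specCost, List.map_map, zero_add]
  rfl

-- sum over a nodup list of a function changed only at a member j
lemma sum_map_update {l : List String} (hl : l.Nodup) {j : String} (hj : j ∈ l)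
    (f g : String → Int) (hfg : ∀ k ∈ l, k ≠ j → f k = g k) :
    (l.map f).sum = (l.map g).sum + (f j - g j) := by
  have hperm := List.perm_cons_erase hj
  have hf := (hperm.map f).sum_eq
  have hg := (hperm.map g).sum_eq
  have herase : (l.erase j).map f = (l.erase j).map g := by
    apply List.map_congr_left
    intro k hk
    have := (List.Nodup.mem_erase_iff hl).1 hk
    exact hfg k this.2 this.1
  rw [hf, hg, List.map_cons, List.map_cons, List.sum_cons, List.sum_cons, herase]
  ring

lemma ofList_append_singleton (xs : List String) (j : String) :
    PySem.Set.ofList (xs ++ [j]) = PySem.Set.add (PySem.Set.ofList xs) j := by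
  simp [PySem.Set.ofList, List.foldl_append]

lemma specCost_append (xs : List String) (j : String) :
    specCost (xs ++ [j])
      = specCost xs + (if xs.count j % 2 = 1 then 0 else 1) := by
  have hcount : ∀ k : String, List.count k (xs ++ [j])
      = List.count k xs + (if k = j then 1 else 0) := by
    intro k
    rcases eq_or_ne k j with rfl | hne
    · simp [List.count_append]
    · simp [List.count_append, hne, Ne.symm hne]
  by_cases hmem : j ∈ xs
  · -- j already a key: the set of distinct jewels does not change
    have hj' : j ∈ PySem.Set.ofList xs := (PySem.Set.mem_ofList xs j).2 hmem
    have hset : PySem.Set.ofList (xs ++ [j]) = PySem.Set.ofList xs := by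
      rw [ofList_append_singleton]
      simp [PySem.Set.add, hj']
    unfold specCost
    rw [hset,
      sum_map_update (PySem.Set.nodup_ofList xs) hj'
        (fun k => PySem.Int.floordiv ((List.count k (xs ++ [j]) : Int) + 1) 2)
        (fun k => PySem.Int.floordiv ((List.count k xs : Int) + 1) 2)
        (by
          intro k _ hk
          simp [hcount k, hk])]
    have hcj : List.count j (xs ++ [j]) = List.count j xs + 1 := by simp [hcount j]
    rw [hcj]
    rw [PySem.Int.floordiv_eq_ediv_of_pos (by norm_num),
        PySem.Int.floordiv_eq_ediv_of_pos (by norm_num)]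
    rcases Nat.even_or_odd (xs.count j) with he | ho
    · have h2 : xs.count j % 2 = 0 := Nat.even_iff.1 he
      have : ((xs.count j : Int)) % 2 = 0 := by omega
      simp only [h2]
      push_cast
      omega
    · have h2 : xs.count j % 2 = 1 := Nat.odd_iff.1 ho
      have : ((xs.count j : Int)) % 2 = 1 := by omega
      simp only [h2]
      push_cast
      omega
  · -- fresh jewel: it is appended to the distinct set with count 1
    have hj0 : List.count j xs = 0 := List.count_eq_zero.2 hmem
    have hset : PySem.Set.ofList (xs ++ [j]) = PySem.Set.ofList xs ++ [j] := by
      rw [ofList_append_singleton]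
      have : j ∉ PySem.Set.ofList xs := fun h => hmem ((PySem.Set.mem_ofList xs j).1 h)
      simp [PySem.Set.add, this]
    unfold specCost
    rw [hset, List.map_append, List.sum_append]
    have hrest : (PySem.Set.ofList xs).map
          (fun k => PySem.Int.floordiv ((List.count k (xs ++ [j]) : Int) + 1) 2)
        = (PySem.Set.ofList xs).map
          (fun k => PySem.Int.floordiv ((List.count k xs : Int) + 1) 2) := by
      apply List.map_congr_left
      intro k hk
      have hkj : k ≠ j := fun h => hmem (h ▸ (PySem.Set.mem_ofList xs k).1 hk)
      simp [hcount k, hkj]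
    rw [hrest]
    have hcj : List.count j (xs ++ [j]) = 1 := by simp [hcount j, hj0]
    simp [hj0, PySem.Int.floordiv]

-- the invariant of B's single pass
lemma pvAltCase_inv (xs : List String) :
    (∀ k : String, k ∈ (pvAltCase xs).1 ↔ xs.count k % 2 = 1)
      ∧ (pvAltCase xs).2 = specCost xs := by
  induction xs using List.reverseRecOn with
  | nil =>
    constructor
    · intro k; simp [pvAltCase, PySem.Set.empty]
    · simp [pvAltCase, specCost, PySem.Set.ofList, PySem.Set.empty]
  | append_singleton xs j ih =>
    obtain ⟨hmem, hcost⟩ := ih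
    have hstep : pvAltCase (xs ++ [j])
        = (if PySem.Set.contains (pvAltCase xs).1 j
            then (PySem.Set.discard (pvAltCase xs).1 j, (pvAltCase xs).2)
            else (PySem.Set.add (pvAltCase xs).1 j, (pvAltCase xs).2 + 1)) := by
      simp [pvAltCase, List.foldl_append]
    have hcontains : PySem.Set.contains (pvAltCase xs).1 j = decide (xs.count j % 2 = 1) := by
      have : PySem.Set.contains (pvAltCase xs).1 j = decide (j ∈ (pvAltCase xs).1) := by
        simp [PySem.Set.contains]
      rw [this]
      by_cases h : xs.count j % 2 = 1
      · simp [h, (hmem j).2 h]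
      · have hnj : j ∉ (pvAltCase xs).1 := fun hj => h ((hmem j).1 hj)
        simp [h, hnj]
    have hcnt : ∀ k : String, List.count k (xs ++ [j])
        = List.count k xs + (if k = j then 1 else 0) := by
      intro k
      rcases eq_or_ne k j with rfl | hne
      · simp [List.count_append]
      · simp [List.count_append, hne, Ne.symm hne]
    by_cases hodd : xs.count j % 2 = 1
    · rw [hstep, hcontains, if_pos (by simpa using hodd)]
      constructor
      · intro k
        rcases eq_or_ne k j with rfl | hne
        · simp [PySem.Set.discard, List.mem_filter, hcnt k]
          omega
        · simp only [PySem.Set.discard, List.mem_filter, hmem k, hcnt k]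
          simp [hne]
      · rw [hcost, specCost_append]
        simp [hodd]
    · rw [hstep, hcontains, if_neg (by simpa using hodd)]
      constructor
      · intro k
        rcases eq_or_ne k j with rfl | hne
        · rw [PySem.Set.mem_add]
          simp [hmem k, hcnt k]
          omega
        · rw [PySem.Set.mem_add]
          simp [hmem k, hcnt k, hne]
      · rw [hcost, specCost_append]
        simp [hodd]

lemma foldl_append_eq_map (tcs : List (List String)) (f : List String → Int) :
    ∀ acc : List Int, tcs.foldl (fun r x => r ++ [f x]) acc = acc ++ tcs.map f := by
  induction tcs with
  | nil => intro acc; simp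
  | cons x xs ih => intro acc; simp [ih]

-- ===== VERDICT (by name: the statement is the Claim_ definition above) =====
theorem min_cost_to_buy_jewels_spec : Claim_equal_min_cost_to_buy_jewels := by
  intro tcs _
  unfold Spec_min_cost_to_buy_jewels min_cost_to_buy_jewels min_cost_to_buy_jewels_alt
  rw [show (fun (results : List Int) (jewels : List String) =>
        results ++ [(PySem.Dict.values
            (jewels.foldl (fun d jewel =>
                if d.contains jewel then d.modify jewel 0 (· + 1) else d.insert jewel 1)
              PySem.Dict.empty)).foldl
          (fun cost count => cost + PySem.Int.floordiv (count + 1) 2) 0])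
      = (fun results jewels => results ++ [specCost jewels]) from
    funext fun r => funext fun jewels => by rw [costA_eq_specCost]]
  rw [foldl_append_eq_map tcs specCost []]
  simp only [List.nil_append]
  apply List.map_congr_left
  intro jewels _
  exact ((pvAltCase_inv jewels).2).symm
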